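-- pv_equiv track=rewrite | github.com/RGlodAkshat/HushhVoice | backend/agents/email_assistant/helper_functions.py | build_email_context
-- ===== SOURCE A (Python) =====
-- from typing import List, Dict
--
-- def build_email_context(emails: List[Dict[str, str]], limit: int = 20, max_chars: int = 12000) -> str:
--     """
--     Build a compact, bounded context string for the LLM to reason over
--     (keeps tokens under control).
--     """
--     block_lines = []
--     total = 0
--     for i, mail in enumerate(emails[:limit], start=1):
--         block = (
--             f"Email {i}:\n"
--             f"From: {mail.get('from','')}\n"
--             f"Subject: {mail.get('subject','')}\n"
--             f"Date: {mail.get('date','')}\n"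
--             f"Snippet: {mail.get('snippet','')}\n"
--         )
--         total += len(block)
--         if total > max_chars:
--             break
--         block_lines.append(block)
--     return "\n".join(block_lines)
-- ===== SOURCE B (Python) =====
-- from typing import List, Dict
--
-- def build_email_context(emails: List[Dict[str, str]], limit: int = 20, max_chars: int = 12000) -> str:
--     """Two-phase: build all blocks first, then keep the longest prefix whose
--     cumulative length stays within max_chars, then join."""
--     blocks = [
--         (
--             f"Email {i}:\n"
--             f"From: {mail.get('from','')}\n"
--             f"Subject: {mail.get('subject','')}\n"
--             f"Date: {mail.get('date','')}\n"
--             f"Snippet: {mail.get('snippet','')}\n"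
--         )
--         for i, mail in enumerate(emails[:limit], start=1)
--     ]
--     cums = []
--     running = 0
--     for b in blocks:
--         running += len(b)
--         cums.append(running)
--     # cumulative sums are nondecreasing, so counting the ones <= max_chars
--     # gives exactly the length of the admissible prefix
--     keep = sum(1 for t in cums if t <= max_chars)
--     return "\n".join(blocks[:keep])
-- ===== Notes on version B (the rewrite author's own statement) =====
-- stated objective: alternative
-- what changed: Replaces the interleaved format-accumulate-break loop by a two-phase pipeline: build the full list of blocks for emails[:limit] with a comprehension, compute cumulative lengths, count how many stay <= max_chars (valid because the sums are nondecreasing), and join that prefix.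
import Mathlib
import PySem

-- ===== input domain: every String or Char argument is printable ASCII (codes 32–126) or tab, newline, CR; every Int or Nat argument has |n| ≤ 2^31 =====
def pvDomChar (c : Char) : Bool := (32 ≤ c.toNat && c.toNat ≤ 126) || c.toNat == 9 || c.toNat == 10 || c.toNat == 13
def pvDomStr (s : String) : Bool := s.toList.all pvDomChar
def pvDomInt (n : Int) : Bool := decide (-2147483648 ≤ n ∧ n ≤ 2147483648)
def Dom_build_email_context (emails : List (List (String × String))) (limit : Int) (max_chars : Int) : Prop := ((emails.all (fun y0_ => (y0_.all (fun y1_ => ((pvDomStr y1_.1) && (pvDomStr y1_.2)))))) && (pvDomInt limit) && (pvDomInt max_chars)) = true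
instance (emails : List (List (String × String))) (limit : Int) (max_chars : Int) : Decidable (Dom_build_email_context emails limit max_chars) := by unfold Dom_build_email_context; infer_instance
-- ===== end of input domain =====

-- B builds all blocks first, then keeps the longest prefix of cumulative length ≤ max_chars (count of nondecreasing cumulative sums ≤ max_chars), instead of A's interleaved accumulate-and-break loop; objective: alternative decomposition, same cost.

-- the f-string block, identical in both Pythons (as List Char)
def pvBlock (i : Int) (mail : List (String × String)) : List Char :=
  "Email ".toList ++ PySem.Int.toChars i ++ ":\nFrom: ".toList
    ++ (PySem.Dict.getD (PySem.Dict.mk mail) "from" "").toList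
    ++ "\nSubject: ".toList ++ (PySem.Dict.getD (PySem.Dict.mk mail) "subject" "").toList
    ++ "\nDate: ".toList ++ (PySem.Dict.getD (PySem.Dict.mk mail) "date" "").toList
    ++ "\nSnippet: ".toList ++ (PySem.Dict.getD (PySem.Dict.mk mail) "snippet" "").toList
    ++ "\n".toList

-- ===== PORT A =====
-- A's loop: format, accumulate, break when over budget, else append
def pvLoopA (max_chars : Int) : List (Int × List (String × String)) → Int → List (List Char) → List (List Char)
  | [], _, block_lines => block_lines
  | (i, mail) :: rest, total, block_lines =>
      let block := pvBlock i mail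
      let total' := total + (block.length : Int)
      if total' > max_chars then block_lines
      else pvLoopA max_chars rest total' (block_lines ++ [block])

def build_email_context (emails : List (List (String × String))) (limit : Int) (max_chars : Int) : String :=
  String.ofList (PySem.Chars.join "\n".toList
    (pvLoopA max_chars (PySem.List.enumerate (PySem.List.slice emails none (some limit)) 1) 0 []))

-- ===== PORT B =====
-- B: build all blocks, cumulative sums, count of sums ≤ max_chars, join that prefix
def build_email_context_alt (emails : List (List (String × String))) (limit : Int) (max_chars : Int) : String :=
  let blocks := (PySem.List.enumerate (PySem.List.slice emails none (some limit)) 1).map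
    (fun p => pvBlock p.1 p.2)
  let cums := (blocks.foldl
    (fun (st : List Int × Int) b =>
      let running := st.2 + (b.length : Int); (st.1 ++ [running], running)) ([], 0)).1
  let keep := (cums.filter (fun t => t ≤ max_chars)).length
  String.ofList (PySem.Chars.join "\n".toList (blocks.take keep))

-- ===== PRECONDITION & SPEC =====
def Spec_build_email_context (emails : List (List (String × String))) (limit : Int) (max_chars : Int) (out : String) : Prop := out = build_email_context_alt emails limit max_chars
instance (emails : List (List (String × String))) (limit : Int) (max_chars : Int) (out : String) : Decidable (Spec_build_email_context emails limit max_chars out) := by unfold Spec_build_email_context; infer_instance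

-- ===== CLAIM (what is proved, stated in full; the proofs are below) =====
def Claim_equal_build_email_context : Prop := ∀ (emails : List (List (String × String))) (limit : Int) (max_chars : Int), Dom_build_email_context emails limit max_chars → Spec_build_email_context emails limit max_chars (build_email_context emails limit max_chars)

-- ===== LEMMAS AND PROOFS =====

-- number of blocks A keeps, as a recursive function of remaining blocks and running total
def pvKeep (max_chars : Int) : List (List Char) → Int → Nat
  | [], _ => 0
  | b :: rest, total =>
      if total + (b.length : Int) > max_chars then 0
      else pvKeep max_chars rest (total + (b.length : Int)) + 1

-- cumulative sums of lengths starting from total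
def pvCums : List (List Char) → Int → List Int
  | [], _ => []
  | b :: rest, total => (total + (b.length : Int)) :: pvCums rest (total + (b.length : Int))

theorem pvLoopA_eq (max_chars : Int) (ps : List (Int × List (String × String))) :
    ∀ (total : Int) (acc : List (List Char)),
      pvLoopA max_chars ps total acc
        = acc ++ (ps.map (fun p => pvBlock p.1 p.2)).take
            (pvKeep max_chars (ps.map (fun p => pvBlock p.1 p.2)) total) := by
  induction ps with
  | nil => intro total acc; simp [pvLoopA, pvKeep]
  | cons p rest ih =>
      intro total acc
      obtain ⟨i, mail⟩ := p
      simp only [pvLoopA, pvKeep, List.map_cons]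
      split_ifs with h
      · simp
      · rw [ih]; simp

theorem pvFoldl_cums (bs : List (List Char)) :
    ∀ (acc : List Int) (total : Int),
      (bs.foldl (fun (st : List Int × Int) b =>
        let running := st.2 + (b.length : Int); (st.1 ++ [running], running)) (acc, total)).1
        = acc ++ pvCums bs total := by
  induction bs with
  | nil => intro acc total; simp [pvCums]
  | cons b rest ih => intro acc total; simp only [List.foldl_cons, pvCums]; rw [ih]; simp

theorem pvCums_ge (bs : List (List Char)) :
    ∀ (total x : Int), x ∈ pvCums bs total → total ≤ x := by
  induction bs with
  | nil => intro total x hx; simp [pvCums] at hx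
  | cons b rest ih =>
      intro total x hx
      simp only [pvCums, List.mem_cons] at hx
      rcases hx with h | h
      · omega
      · have := ih (total + (b.length : Int)) x h; omega

theorem pvCount_eq_keep (max_chars : Int) (bs : List (List Char)) :
    ∀ (total : Int),
      ((pvCums bs total).filter (fun t => t ≤ max_chars)).length = pvKeep max_chars bs total := by
  induction bs with
  | nil => intro total; simp [pvCums, pvKeep]
  | cons b rest ih =>
      intro total
      simp only [pvCums, pvKeep, List.filter_cons]
      by_cases h : total + (b.length : Int) > max_chars
      · rw [if_pos h, if_neg (by simp; omega : ¬ ((fun t => decide (t ≤ max_chars)) (total + (b.length : Int)) = true))]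
        apply List.length_eq_zero_iff.mpr
        apply List.filter_eq_nil_iff.mpr
        intro x hx
        have := pvCums_ge rest (total + (b.length : Int)) x hx
        simp only [decide_eq_true_eq]
        omega
      · rw [if_neg h, if_pos (by simp; omega : ((fun t => decide (t ≤ max_chars)) (total + (b.length : Int)) = true))]
        simp only [List.length_cons, ih]

-- ===== VERDICT (by name: the statement is the Claim_ definition above) =====
theorem build_email_context_spec : Claim_equal_build_email_context := by
  intro emails limit max_chars _
  unfold Spec_build_email_context build_email_context build_email_context_alt
  rw [pvLoopA_eq]
  simp only [pvFoldl_cums, List.nil_append, pvCount_eq_keep]
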